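-- pv_equiv track=rewrite | github.com/one-year-gap/counseling-analytics | app/services/recommendation/utils.py | age_from_ctx
-- ===== SOURCE A (Python) =====
-- def age_from_ctx(ctx: dict) -> int | None:
--     raw = (ctx.get("age_group") or "").strip()
--     num_str = "".join(ch for ch in raw if ch.isdigit())
--     if not num_str:
--         return None
--     try:
--         return int(num_str)
--     except ValueError:
--         return None
-- ===== SOURCE B (Python) =====
-- def age_from_ctx(ctx: dict) -> int | None:
--     raw = (ctx.get("age_group") or "").strip()
--     num = 0
--     found = False
--     for ch in raw:
--         if ch.isdigit():
--             num = num * 10 + (ord(ch) - 48)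
--             found = True
--     return num if found else None
-- ===== Notes on version B (the rewrite author's own statement) =====
-- stated objective: alternative
-- what changed: Instead of building an intermediate string of the digit characters and then parsing it with int(), B folds the digits into the integer directly in a single pass with a found-flag.
import Mathlib
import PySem

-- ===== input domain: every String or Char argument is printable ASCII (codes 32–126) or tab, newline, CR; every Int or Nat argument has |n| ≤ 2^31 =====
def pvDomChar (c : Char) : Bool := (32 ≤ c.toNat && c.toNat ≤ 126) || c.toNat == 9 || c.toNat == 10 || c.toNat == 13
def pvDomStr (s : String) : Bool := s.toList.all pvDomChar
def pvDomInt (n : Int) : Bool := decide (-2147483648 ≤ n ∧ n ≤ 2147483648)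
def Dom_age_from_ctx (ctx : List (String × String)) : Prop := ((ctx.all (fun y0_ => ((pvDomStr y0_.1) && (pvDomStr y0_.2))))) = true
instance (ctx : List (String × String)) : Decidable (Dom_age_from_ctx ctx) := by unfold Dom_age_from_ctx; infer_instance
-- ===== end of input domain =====

-- B folds the digit characters of the stripped "age_group" value directly into the integer in one
-- pass with a found-flag, instead of joining them into a string and parsing it (objective: alternative).


-- ===== PORT A =====
-- int(s) in A is only ever applied to a non-empty string of characters passing str.isdigit (in the
-- ASCII domain: '0'..'9'), where it is exactly the decimal fold below and the except branch never
-- fires; it is ported by hand as that fold, exact on this domain.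
def pvDecVal (cs : List Char) : Int := cs.foldl (fun n c => n * 10 + ((c.toNat : Int) - 48)) 0

def age_from_ctx (ctx : List (String × String)) : Option Int :=
  -- raw = (ctx.get("age_group") or "").strip()  (the value is a string, so "or" only replaces None/"")
  let raw := PySem.Str.strip (((PySem.Dict.ofList ctx).get? "age_group").getD "")
  -- num_str = "".join(ch for ch in raw if ch.isdigit())
  let numStr := raw.toList.filter PySem.Chars.isdigit
  if numStr.isEmpty then none
  else some (pvDecVal numStr)

-- ===== PORT B =====
def age_from_ctx_alt (ctx : List (String × String)) : Option Int :=
  let raw := PySem.Str.strip (((PySem.Dict.ofList ctx).get? "age_group").getD "")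
  let st := raw.toList.foldl
    (fun (st : Int × Bool) ch =>
      if PySem.Chars.isdigit ch then (st.1 * 10 + ((ch.toNat : Int) - 48), true) else st)
    (0, false)
  if st.2 then some st.1 else none

-- ===== PRECONDITION & SPEC =====
def Spec_age_from_ctx (ctx : List (String × String)) (out : Option Int) : Prop := out = age_from_ctx_alt ctx
instance (ctx : List (String × String)) (out : Option Int) : Decidable (Spec_age_from_ctx ctx out) := by unfold Spec_age_from_ctx; infer_instance

-- ===== CLAIM (what is proved, stated in full; the proofs are below) =====
def Claim_equal_age_from_ctx : Prop := ∀ (ctx : List (String × String)), Dom_age_from_ctx ctx → Spec_age_from_ctx ctx (age_from_ctx ctx)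

-- ===== LEMMAS AND PROOFS =====

-- B's one-pass fold computes (decimal value of the kept digits, "some digit was seen").
theorem foldl_digits_eq (cs : List Char) (a : Int) (f : Bool) :
    cs.foldl
      (fun (st : Int × Bool) ch =>
        if PySem.Chars.isdigit ch then (st.1 * 10 + ((ch.toNat : Int) - 48), true) else st)
      (a, f)
    = ((cs.filter PySem.Chars.isdigit).foldl (fun n c => n * 10 + ((c.toNat : Int) - 48)) a,
       f || !(cs.filter PySem.Chars.isdigit).isEmpty) := by
  induction cs generalizing a f with
  | nil => simp
  | cons c cs ih =>
    by_cases h : PySem.Chars.isdigit c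
    · simp [h, ih]
    · simp [h, ih]

-- ===== VERDICT (by name: the statement is the Claim_ definition above) =====
theorem age_from_ctx_spec : Claim_equal_age_from_ctx := by
  intro ctx _
  unfold Spec_age_from_ctx age_from_ctx age_from_ctx_alt pvDecVal
  simp only [foldl_digits_eq]
  cases h : ((PySem.Str.strip
      (((PySem.Dict.ofList ctx).get? "age_group").getD "")).toList.filter PySem.Chars.isdigit).isEmpty <;>
    simp_all
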